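-- pv_equiv track=rewrite | github.com/miemiekurisu/python-pdfresize | scanmodule/generalscan.py | rawscannew
-- ===== SOURCE A (Python) =====
-- def rawscannew(verticalscan):
--     begin=0
--     flag=0
--     par = []
--
--     for i in range(0,len(verticalscan)):
--         if (flag ==0 and verticalscan[i]==0):
--             flag=0
-- #             print 'A begin='+str(begin)
-- #             print 'A flag='+str(flag)
--         elif (flag ==0 and verticalscan[i]==1):
--             begin=i
--             flag=1
-- #             print 'B begin='+str(begin)
-- #             print 'B flag='+str(flag)
--         elif (flag==1 and verticalscan[i]==0):
--             par.append([begin,i+1])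
--             flag=0
-- #             print 'C begin='+str(begin)
-- #             print 'C flag='+str(flag)
--     return par
-- ===== SOURCE B (Python) =====
-- def rawscannew(verticalscan):
--     # Two nested find-scans (seek next 1, then seek next 0) instead of a flag state machine.
--     par = []
--     i = 0
--     n = len(verticalscan)
--     while True:
--         while i < n and verticalscan[i] != 1:
--             i += 1
--         if i >= n:
--             break
--         begin = i
--         while i < n and verticalscan[i] != 0:
--             i += 1
--         if i >= n:
--             break
--         par.append([begin, i + 1])
--         i += 1
--     return par
-- ===== Notes on version B (the rewrite author's own statement) =====
-- stated objective: alternative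
-- what changed: Replaces A's single pass with a flag/begin state machine by two nested find-scans: seek the next 1 (run start), then seek the next 0 (run close), emit [begin, zero_index+1] and resume after the closing zero.
import Mathlib
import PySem

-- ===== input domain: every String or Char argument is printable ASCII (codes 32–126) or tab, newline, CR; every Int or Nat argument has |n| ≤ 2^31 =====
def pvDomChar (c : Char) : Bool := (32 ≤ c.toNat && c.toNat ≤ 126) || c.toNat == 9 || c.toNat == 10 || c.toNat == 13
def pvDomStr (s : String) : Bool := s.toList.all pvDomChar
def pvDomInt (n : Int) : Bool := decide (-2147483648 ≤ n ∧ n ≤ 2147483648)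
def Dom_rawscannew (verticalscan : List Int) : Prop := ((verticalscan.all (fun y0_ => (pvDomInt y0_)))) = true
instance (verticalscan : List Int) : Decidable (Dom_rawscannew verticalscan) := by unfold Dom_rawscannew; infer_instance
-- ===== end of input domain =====

-- B replaces A's flag state machine by two nested find-scans (seek the next 1,
-- then seek the next closing 0); same cost, plainer structure (objective: alternative).

-- ===== PORT A =====
-- one loop-body step of A: state is (begin, flag, par), i the loop index
def pvStepA (s : Int × Int × List (List Int)) (i v : Int) : Int × Int × List (List Int) :=
  if s.2.1 = 0 ∧ v = 0 then (s.1, 0, s.2.2)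
  else if s.2.1 = 0 ∧ v = 1 then (i, 1, s.2.2)
  else if s.2.1 = 1 ∧ v = 0 then (s.1, 0, s.2.2 ++ [[s.1, i + 1]])
  else s

def rawscannew (verticalscan : List Int) : List (List Int) :=
  ((PySem.List.pyRange 0 (verticalscan.length : Int) 1).foldl
      (fun s i => pvStepA s i (PySem.List.pyGetD verticalscan i 0)) (0, 0, [])).2.2

-- ===== PORT B =====
-- the two while-loops of Source B, transcribed as recursion on the remaining suffix
-- (i is the absolute index of the head of the suffix)
mutual
  -- outer scan: advance until verticalscan[i] == 1 (that index becomes `begin`)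
  def pvSeek : List Int → Int → List (List Int)
    | [], _ => []
    | v :: rest, i => if v = 1 then pvClose i rest (i + 1) else pvSeek rest (i + 1)
  -- inner scan: advance until verticalscan[i] == 0, emit [b, i+1], resume after it
  def pvClose : Int → List Int → Int → List (List Int)
    | _, [], _ => []
    | b, v :: rest, i =>
        if v = 0 then [b, i + 1] :: pvSeek rest (i + 1) else pvClose b rest (i + 1)
end

def rawscannew_alt (verticalscan : List Int) : List (List Int) :=
  pvSeek verticalscan 0

-- ===== PRECONDITION & SPEC =====
def Spec_rawscannew (verticalscan : List Int) (out : List (List Int)) : Prop := out = rawscannew_alt verticalscan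
instance (verticalscan : List Int) (out : List (List Int)) : Decidable (Spec_rawscannew verticalscan out) := by unfold Spec_rawscannew; infer_instance

-- ===== CLAIM (what is proved, stated in full; the proofs are below) =====
def Claim_equal_rawscannew : Prop := ∀ (verticalscan : List Int), Dom_rawscannew verticalscan → Spec_rawscannew verticalscan (rawscannew verticalscan)

-- ===== LEMMAS AND PROOFS =====

-- the fold over index/value pairs, for the invariant proof
def pvFoldE (xs : List (Int × Int)) (s : Int × Int × List (List Int)) :
    Int × Int × List (List Int) :=
  xs.foldl (fun s p => pvStepA s p.1 p.2) s

theorem pvFoldE_cons (p : Int × Int) (xs : List (Int × Int)) (s : Int × Int × List (List Int)) :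
    pvFoldE (p :: xs) s = pvFoldE xs (pvStepA s p.1 p.2) := rfl

theorem pvFoldE_inv (vs : List Int) : ∀ (i : Int) (par : List (List Int)),
    (∀ b, (pvFoldE (PySem.List.enumerate vs i) (b, 0, par)).2.2 = par ++ pvSeek vs i) ∧
    (∀ b, (pvFoldE (PySem.List.enumerate vs i) (b, 1, par)).2.2 = par ++ pvClose b vs i) := by
  induction vs with
  | nil => intro i par; simp [pvFoldE, pvSeek, pvClose, PySem.List.enumerate_nil]
  | cons v rest ih =>
    intro i par
    constructor
    · intro b
      rw [PySem.List.enumerate_cons, pvFoldE_cons]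
      by_cases h1 : v = 1
      · simp only [pvStepA, pvSeek, h1]
        norm_num
        exact (ih (i+1) par).2 i
      · by_cases h0 : v = 0 <;>
          · simp only [pvStepA, pvSeek, h1, h0]
            norm_num [h0, h1]
            exact (ih (i+1) par).1 b
    · intro b
      rw [PySem.List.enumerate_cons, pvFoldE_cons]
      by_cases h0 : v = 0
      · simp only [pvStepA, pvClose, h0]
        norm_num
        rw [(ih (i+1) (par ++ [[b, i+1]])).1 b]
        simp
      · simp only [pvStepA, pvClose, h0]
        norm_num [h0]
        exact (ih (i+1) par).2 b

-- ===== VERDICT (by name: the statement is the Claim_ definition above) =====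
theorem rawscannew_spec : Claim_equal_rawscannew := by
  intro vs _
  unfold Spec_rawscannew rawscannew rawscannew_alt
  have hmap := PySem.List.enumerate_eq_map_pyRange vs 0
  calc ((PySem.List.pyRange 0 (vs.length : Int) 1).foldl
          (fun s i => pvStepA s i (PySem.List.pyGetD vs i 0)) (0, 0, [])).2.2
      = (pvFoldE (PySem.List.enumerate vs 0) (0, 0, [])).2.2 := by
        rw [pvFoldE, hmap, List.foldl_map]; simp [PySem.List.len]
    _ = pvSeek vs 0 := by simpa using (pvFoldE_inv vs 0 []).1 0
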